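-- pv_equiv track=rewrite | github.com/kamallouisnahas/Contour | Contour_v1.1.py | shrink_list
-- ===== SOURCE A (Python) =====
-- def shrink_list(the_list,lower,upper):
--     try:
--         if min(the_list)<int(lower):
--             index=0
--             count=0
--             the_list=sorted(the_list)
--             while index<len(the_list):
--                 if the_list[index]<=int(lower):
--                     del the_list[index]
--                 else:
--                     index=index+1
--
--         elif min(the_list)>int(lower):
--             pass
--
--
--         if max(the_list)>int(upper):
--             index=0
--             count=0
--             the_list=sorted(the_list,reverse=True)
--             while index<len(the_list):
--                 if the_list[index]>int(upper):
--                     count=count+1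
--                 index=index+1
--             del the_list[0:count]
--         return the_list
--     except ValueError:
--         return the_list #returns the original untouched list
-- ===== SOURCE B (Python) =====
-- def shrink_list(the_list, lower, upper):
--     # one filter+sort pass per phase instead of A's repeated in-place deletions
--     if not the_list:
--         return the_list
--     kept = the_list
--     if min(the_list) < lower:
--         kept = sorted(x for x in the_list if x > lower)
--         if not kept:
--             return kept
--     if max(kept) > upper:
--         kept = sorted((x for x in kept if x <= upper), reverse=True)
--     return kept
-- ===== Notes on version B (the rewrite author's own statement) =====
-- stated objective: faster
-- what changed: Replaces A's two sort-then-scan-with-repeated-del passes (quadratic deletions) by a single filter comprehension plus one sort per phase.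
import Mathlib
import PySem

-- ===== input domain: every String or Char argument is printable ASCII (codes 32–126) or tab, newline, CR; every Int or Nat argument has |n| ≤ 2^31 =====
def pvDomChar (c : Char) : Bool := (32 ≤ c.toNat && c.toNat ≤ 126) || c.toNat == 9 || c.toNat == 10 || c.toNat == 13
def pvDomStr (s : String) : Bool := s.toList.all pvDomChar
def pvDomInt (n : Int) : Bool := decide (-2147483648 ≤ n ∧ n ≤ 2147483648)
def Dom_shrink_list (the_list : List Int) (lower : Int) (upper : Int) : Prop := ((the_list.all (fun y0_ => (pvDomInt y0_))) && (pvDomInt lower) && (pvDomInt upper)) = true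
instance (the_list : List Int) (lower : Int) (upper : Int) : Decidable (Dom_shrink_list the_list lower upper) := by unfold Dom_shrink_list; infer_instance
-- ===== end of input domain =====

-- B replaces A's sort-then-scan-with-repeated-del passes by a filter plus one sort per phase
-- (measured faster on large inputs); return values agree on every input, no mutation of the caller's list.

-- ===== PORT A =====
-- the first while loop: index scan over the ascending-sorted list, `del the_list[index]` when ≤ lower
def pvLoop1 (l : List Int) (lower : Int) (index : Nat) : List Int :=
  if h : index < l.length then
    if l[index] ≤ lower then
      pvLoop1 (l.eraseIdx index) lower index   -- del the_list[index]
    else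
      pvLoop1 l lower (index + 1)
  else l
termination_by l.length - index
decreasing_by
  · have := List.length_eraseIdx_of_lt h; omega
  · omega

-- the second while loop: count elements > upper
def pvLoop2 (l : List Int) (upper : Int) (index : Nat) (count : Nat) : Nat :=
  if h : index < l.length then
    pvLoop2 l upper (index + 1) (if upper < l[index] then count + 1 else count)
  else count
termination_by l.length - index

def shrink_list (the_list : List Int) (lower : Int) (upper : Int) : List Int :=
  -- try: min(the_list) raises ValueError exactly on []; the except returns the_list unchanged
  match PySem.List.min? the_list (fun x => x) with
  | none => the_list
  | some m =>
    -- elif min(the_list) > int(lower): pass  — no effect, folded into the else branch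
    let l1 := if m < lower then pvLoop1 (PySem.List.sorted the_list (fun x => x) false) lower 0
              else the_list
    match PySem.List.max? l1 (fun x => x) with
    | none => l1           -- max([]) raises ValueError; except returns the current list
    | some M =>
      if upper < M then
        let l2 := PySem.List.sorted l1 (fun x => x) true
        l2.drop (pvLoop2 l2 upper 0 0)          -- del the_list[0:count] (count ≤ len ⇒ drop is exact)
      else l1

-- ===== PORT B =====
def shrink_list_alt (the_list : List Int) (lower : Int) (upper : Int) : List Int :=
  if the_list = [] then the_list
  else
    let kept :=
      match PySem.List.min? the_list (fun x => x) with
      | some m =>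
        if m < lower then
          PySem.List.sorted (the_list.filter (fun x => decide (lower < x))) (fun x => x) false
        else the_list
      | none => the_list   -- unreachable: the_list ≠ []
    if kept = [] then kept
    else
      match PySem.List.max? kept (fun x => x) with
      | some M =>
        if upper < M then
          PySem.List.sorted (kept.filter (fun x => decide (x ≤ upper))) (fun x => x) true
        else kept
      | none => kept       -- unreachable: kept ≠ []

-- ===== PRECONDITION & SPEC =====
def Spec_shrink_list (the_list : List Int) (lower : Int) (upper : Int) (out : List Int) : Prop := out = shrink_list_alt the_list lower upper
instance (the_list : List Int) (lower : Int) (upper : Int) (out : List Int) : Decidable (Spec_shrink_list the_list lower upper out) := by unfold Spec_shrink_list; infer_instance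

-- ===== CLAIM (what is proved, stated in full; the proofs are below) =====
def Claim_equal_shrink_list : Prop := ∀ (the_list : List Int) (lower : Int) (upper : Int), Dom_shrink_list the_list lower upper → Spec_shrink_list the_list lower upper (shrink_list the_list lower upper)

-- ===== LEMMAS AND PROOFS =====

-- A's first while loop keeps the prefix already scanned and filters the rest to elements > lower
theorem pvLoop1_eq (l : List Int) (lower : Int) (index : Nat) :
    pvLoop1 l lower index
      = l.take index ++ (l.drop index).filter (fun x => decide (lower < x)) := by
  fun_induction pvLoop1 l lower index with
  | case1 l index h hle ih =>
    rw [ih]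
    have hlen : (l.take index).length = index := List.length_take_of_le h.le
    have hd : l.drop index = l[index] :: l.drop (index + 1) := (List.getElem_cons_drop h).symm
    rw [List.eraseIdx_eq_take_drop_succ, List.take_left' hlen, List.drop_left' hlen]
    rw [hd, List.filter_cons]
    simp [hle]
  | case2 l index h hle ih =>
    have ht : l.take (index + 1) = l.take index ++ [l[index]] := by
      rw [List.take_add_one]; simp [List.getElem?_eq_getElem h]
    have hd : l.drop index = l[index] :: l.drop (index + 1) := (List.getElem_cons_drop h).symm
    simp at hle
    rw [ih]
    conv_rhs => rw [hd, List.filter_cons]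
    rw [ht, List.append_assoc, List.singleton_append]
    congr 1
    simp [hle]
  | case3 l index h =>
    have : l.length ≤ index := by omega
    simp [List.take_of_length_le this, List.drop_of_length_le this]

-- A's second while loop counts the elements > upper in the unscanned suffix
theorem pvLoop2_eq (l : List Int) (upper : Int) (index : Nat) (count : Nat) :
    pvLoop2 l upper index count = count + (l.drop index).countP (fun x => decide (upper < x)) := by
  fun_induction pvLoop2 l upper index count with
  | case1 index count h ih =>
    have hd : l.drop index = l[index] :: l.drop (index + 1) := (List.getElem_cons_drop h).symm
    by_cases hc : upper < l[index]
    · simp only [hc, if_true, dif_pos] at ih ⊢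
      rw [ih, hd, List.countP_cons]; simp [hc]; omega
    · simp only [hc, if_false, dif_neg, not_false_iff] at ih ⊢
      rw [ih, hd, List.countP_cons]; simp [hc]
  | case2 index count h =>
    have : l.length ≤ index := by omega
    simp [List.drop_of_length_le this]


-- dropping the count of >-upper elements from a descending list is filtering to ≤ upper
theorem drop_count_desc (l : List Int) (upper : Int)
    (hs : l.Pairwise (fun a b => b ≤ a)) :
    l.drop (l.countP (fun x => decide (upper < x))) = l.filter (fun x => decide (x ≤ upper)) := by
  induction l with
  | nil => simp
  | cons x t ih =>
    rcases List.pairwise_cons.mp hs with ⟨hx, ht⟩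
    by_cases hc : upper < x
    · rw [List.countP_cons, List.filter_cons]
      simp only [hc, decide_true, if_pos]
      have : ¬ (x ≤ upper) := by omega
      simp [this, List.drop_succ_cons, ih ht]
    · have hall : ∀ y ∈ t, ¬ (upper < y) := fun y hy => by have := hx y hy; omega
      have hcnt : t.countP (fun x => decide (upper < x)) = 0 := by
        rw [List.countP_eq_zero]; intro y hy; simpa using hall y hy
      have hfilt : t.filter (fun x => decide (x ≤ upper)) = t := by
        rw [List.filter_eq_self]; intro y hy; have := hall y hy; simp; omega
      rw [List.countP_cons, List.filter_cons]
      simp [hc, hcnt, hfilt]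

-- filtering commutes with ascending sort
theorem filter_sorted (l : List Int) (p : Int → Bool) :
    (PySem.List.sorted l (fun x => x) false).filter p
      = PySem.List.sorted (l.filter p) (fun x => x) false := by
  have h1 : ((PySem.List.sorted l (fun x => x) false).filter p).Perm (l.filter p) :=
    (PySem.List.sorted_perm l (fun x => x) false).filter p
  have h2 : ((PySem.List.sorted l (fun x => x) false).filter p).Pairwise (fun a b => a ≤ b) :=
    List.Pairwise.filter p (PySem.List.sorted_pairwise l (fun x => x))
  exact (PySem.List.sorted_id_eq_of_perm_of_pairwise _ _ h1 h2).symm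


-- filtering commutes with descending sort
theorem filter_sorted_rev (l : List Int) (p : Int → Bool) :
    (PySem.List.sorted l (fun x => x) true).filter p
      = PySem.List.sorted (l.filter p) (fun x => x) true := by
  have h1 : ((PySem.List.sorted l (fun x => x) true).filter p).Perm
      (PySem.List.sorted (l.filter p) (fun x => x) true) :=
    ((PySem.List.sorted_perm l (fun x => x) true).filter p).trans
      (PySem.List.sorted_perm (l.filter p) (fun x => x) true).symm
  have h2 : ((PySem.List.sorted l (fun x => x) true).filter p).Pairwise
      (fun a b : Int => (fun x : Int => -x) a ≤ (fun x : Int => -x) b) :=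
    ((PySem.List.sorted_pairwise_rev l (fun x => x)).filter p).imp (fun h => by simpa using h)
  have h3 : (PySem.List.sorted (l.filter p) (fun x => x) true).Pairwise
      (fun a b : Int => (fun x : Int => -x) a ≤ (fun x : Int => -x) b) :=
    (PySem.List.sorted_pairwise_rev (l.filter p) (fun x => x)).imp (fun h => by simpa using h)
  exact PySem.List.eq_of_perm_of_pairwise_le_of_injective (fun x : Int => -x) neg_injective h1 h2 h3

-- ===== VERDICT (by name: the statement is the Claim_ definition above) =====
theorem shrink_list_spec : Claim_equal_shrink_list := by
  intro the_list lower upper _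
  unfold Spec_shrink_list shrink_list shrink_list_alt
  cases hmin : PySem.List.min? the_list (fun x => x) with
  | none =>
    have hnil : the_list = [] := (PySem.List.min?_eq_none_iff _ _).mp hmin
    simp [hnil]
  | some m =>
    have hne : the_list ≠ [] := by
      intro h
      rw [h, (PySem.List.min?_eq_none_iff ([] : List Int) (fun x => x)).mpr rfl] at hmin
      cases hmin
    have hK : (if m < lower then pvLoop1 (PySem.List.sorted the_list (fun x => x) false) lower 0
                else the_list)
        = (if m < lower then
             PySem.List.sorted (the_list.filter (fun x => decide (lower < x))) (fun x => x) false
           else the_list) := by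
      split_ifs with hc
      · rw [pvLoop1_eq]
        simpa using filter_sorted the_list (fun x => decide (lower < x))
      · rfl
    simp only [if_neg hne]
    rw [hK]
    set K := (if m < lower then
        PySem.List.sorted (the_list.filter (fun x => decide (lower < x))) (fun x => x) false
      else the_list) with hKdef
    cases hmax : PySem.List.max? K (fun x => x) with
    | none =>
      have hKnil : K = [] := (PySem.List.max?_eq_none_iff _ _).mp hmax
      simp [hKnil]
    | some M =>
      have hKne : K ≠ [] := by
        intro h
        rw [h, (PySem.List.max?_eq_none_iff ([] : List Int) (fun x => x)).mpr rfl] at hmax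
        cases hmax
      simp only [if_neg hKne]
      split_ifs with hc
      · rw [pvLoop2_eq]
        simp only [List.drop_zero, Nat.zero_add]
        rw [drop_count_desc _ upper (PySem.List.sorted_pairwise_rev K (fun x => x))]
        exact filter_sorted_rev K (fun x => decide (x ≤ upper))
      · rfl
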